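-- pv_equiv track=rewrite | github.com/squeezboks/advent-of-code | 2022/day08/day08.py | get_forest_visibility
-- ===== SOURCE A (Python) =====
-- def check_row_visibility(trees):
--     vis = []
--     big_tree = -1
--     icu = 0
--
--     for tree in trees:
--         if tree > big_tree:
--             big_tree = tree
--             icu = 1
--         else:
--             icu = 0
--         vis.append(icu)
--     return vis
--
-- def check_array_visibility(forest):
--     return [check_row_visibility(row) for row in forest]
--
-- def transpose(array):
--     return [[array[j][i] for j in range(len(array))] for i in range(len(array[0]))]
--
-- def flip_lr(array):
--     return [[element for element in reversed(row)] for row in array]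
--
-- def check_direction(forest, direction):
--     match direction:
--         case 'left':
--             return check_array_visibility(forest)
--         case 'right':
--             return flip_lr(check_array_visibility(flip_lr(forest)))
--         case 'top':
--             return transpose(check_array_visibility(transpose(forest)))
--         case 'bottom':
--             return transpose(flip_lr(check_array_visibility(flip_lr(transpose(forest)))))
--         case _:
--             raise Exception("oh no, what happened??")
--
-- def get_forest_visibility(forest):
--     num_row = len(forest)
--     num_col = len(forest[0])
--     vl = check_direction(forest, 'left')
--     vr = check_direction(forest, 'right')
--     vt = check_direction(forest, 'top')
--     vb = check_direction(forest, 'bottom')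
--     return [[(vl[i][j] or vr[i][j] or vt[i][j] or vb[i][j]) for j in range(num_row)] for i in range(num_col)]
-- ===== SOURCE B (Python) =====
-- def get_forest_visibility(forest):
--     # Per-cell outward scan: a tree is visible iff in some direction it overtops
--     # every tree between it and the edge; the edge counts as ground of height -1
--     # (AoC heights are nonnegative digits).
--     n = len(forest)
--     result = []
--     for i in range(n):
--         row = forest[i]
--         out_row = []
--         for j in range(n):
--             h = forest[i][j]
--             col = [forest[k][j] for k in range(n)]
--             lines = (row[:j], row[j + 1:], col[:i], col[i + 1:])
--             out_row.append(1 if any(h > max([-1] + line) for line in lines) else 0)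
--         result.append(out_row)
--     return result
-- ===== Notes on version B (the rewrite author's own statement) =====
-- stated objective: simpler
-- what changed: Replaces A's transpose/flip/check_row pipeline (eight whole-grid transformations combined by a doubly-indexed loop) with one direct per-cell scan that checks, for each of the four directions, whether the tree overtops every tree between it and the edge (edge modelled as ground of height -1, matching A's big_tree=-1 initialisation); B trades A's linear running-max sweeps for naive rescans, so it is shorter but asymptotically slower on large grids.
import Mathlib
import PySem

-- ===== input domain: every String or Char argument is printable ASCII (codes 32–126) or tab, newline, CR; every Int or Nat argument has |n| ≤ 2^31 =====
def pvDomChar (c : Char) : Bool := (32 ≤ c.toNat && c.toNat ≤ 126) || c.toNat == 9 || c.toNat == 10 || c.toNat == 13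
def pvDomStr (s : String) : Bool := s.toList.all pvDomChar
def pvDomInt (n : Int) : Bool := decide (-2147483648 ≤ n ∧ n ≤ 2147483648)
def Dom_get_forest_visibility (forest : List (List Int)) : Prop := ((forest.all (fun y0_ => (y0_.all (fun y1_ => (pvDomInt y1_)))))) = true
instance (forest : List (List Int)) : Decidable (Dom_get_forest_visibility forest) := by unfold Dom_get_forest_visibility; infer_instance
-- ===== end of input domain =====

-- B replaces A's transpose/flip/check_row pipeline by a direct per-cell outward scan in the
-- four directions (objective: simpler); return values agree on every input A accepts.

-- ===== PORT A =====
def check_row_visibility (trees : List Int) : List Int :=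
  (trees.foldl
    (fun (st : List Int × Int × Int) tree =>
      if tree > st.2.1 then (st.1 ++ [(1 : Int)], tree, (1 : Int))
      else (st.1 ++ [(0 : Int)], st.2.1, (0 : Int)))
    ([], -1, 0)).1

def check_array_visibility (forest : List (List Int)) : List (List Int) :=
  forest.map check_row_visibility

-- `len(array[0])` raises IndexError on an empty array; the default [] is only ever taken
-- outside Pre_get_forest_visibility, where Python raises.
def transpose (array : List (List Int)) : List (List Int) :=
  (List.range (PySem.List.pyGetD array 0 []).length).map (fun (i : Nat) =>
    (List.range array.length).map (fun (j : Nat) =>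
      PySem.List.pyGetD (PySem.List.pyGetD array (j : Int) []) (i : Int) 0))

def flip_lr (array : List (List Int)) : List (List Int) :=
  array.map (fun row => row.reverse)

-- the `case _: raise` branch is unreachable (A only calls the four literals); [] stands for the raise
def check_direction (forest : List (List Int)) (direction : String) : List (List Int) :=
  if direction = "left" then check_array_visibility forest
  else if direction = "right" then flip_lr (check_array_visibility (flip_lr forest))
  else if direction = "top" then transpose (check_array_visibility (transpose forest))
  else if direction = "bottom" then transpose (flip_lr (check_array_visibility (flip_lr (transpose forest))))
  else []

-- Python's `x or y` on ints
def pyOr (a b : Int) : Int := if a ≠ 0 then a else b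

def get_forest_visibility (forest : List (List Int)) : List (List Int) :=
  let num_row := forest.length
  let num_col := (PySem.List.pyGetD forest 0 []).length
  let vl := check_direction forest "left"
  let vr := check_direction forest "right"
  let vt := check_direction forest "top"
  let vb := check_direction forest "bottom"
  (List.range num_col).map (fun (i : Nat) =>
    (List.range num_row).map (fun (j : Nat) =>
      pyOr (PySem.List.pyGetD (PySem.List.pyGetD vl (i : Int) []) (j : Int) 0)
        (pyOr (PySem.List.pyGetD (PySem.List.pyGetD vr (i : Int) []) (j : Int) 0)
          (pyOr (PySem.List.pyGetD (PySem.List.pyGetD vt (i : Int) []) (j : Int) 0)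
            (PySem.List.pyGetD (PySem.List.pyGetD vb (i : Int) []) (j : Int) 0)))))

-- ===== PORT B =====
-- max(xs) on a list that is nonempty by construction ([-1] + line); the default is never taken
def pymax (xs : List Int) : Int := (PySem.List.max? xs id).getD 0

def get_forest_visibility_alt (forest : List (List Int)) : List (List Int) :=
  let n := forest.length
  (List.range n).map (fun (i : Nat) =>
    let row := PySem.List.pyGetD forest (i : Int) []
    (List.range n).map (fun (j : Nat) =>
      let h := PySem.List.pyGetD (PySem.List.pyGetD forest (i : Int) []) (j : Int) 0
      let col := (List.range n).map (fun (k : Nat) =>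
        PySem.List.pyGetD (PySem.List.pyGetD forest (k : Int) []) (j : Int) 0)
      let lines := [PySem.List.slice row none (some (j : Int)),
                    PySem.List.slice row (some ((j : Int) + 1)) none,
                    PySem.List.slice col none (some (i : Int)),
                    PySem.List.slice col (some ((i : Int) + 1)) none]
      if lines.any (fun line => decide (h > pymax ((-1) :: line))) then (1 : Int) else 0))

-- ===== PRECONDITION & SPEC =====
-- Pre_ is exactly where the Python A returns: the grid is nonempty, the first row has
-- length len(forest) (the final doubly-indexed loop needs num_col = num_row), and every row
-- has at least len(forest) entries; anywhere else A raises IndexError.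
def Pre_get_forest_visibility (forest : List (List Int)) : Prop :=
  forest ≠ [] ∧ (forest.getD 0 []).length = forest.length ∧
    ∀ row ∈ forest, forest.length ≤ row.length

instance (forest : List (List Int)) : Decidable (Pre_get_forest_visibility forest) := by
  unfold Pre_get_forest_visibility; infer_instance

def pvWitness_get_forest_visibility : List (List Int) := [[3, 0], [5, 5]]

def Spec_get_forest_visibility (forest : List (List Int)) (out : List (List Int)) : Prop :=
  out = get_forest_visibility_alt forest

instance (forest : List (List Int)) (out : List (List Int)) : Decidable (Spec_get_forest_visibility forest out) := by
  unfold Spec_get_forest_visibility; infer_instance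

-- ===== CLAIM (what is proved, stated in full; the proofs are below) =====
def Claim_equal_get_forest_visibility : Prop :=
  ∀ (forest : List (List Int)), Dom_get_forest_visibility forest →
    Pre_get_forest_visibility forest →
    Spec_get_forest_visibility forest (get_forest_visibility forest)

-- ===== LEMMAS AND PROOFS =====

-- the list check_row_visibility builds, with the running maximum made explicit
def crvAux : List Int → Int → List Int
  | [], _ => []
  | t :: ts, big => (if t > big then (1 : Int) else 0) :: crvAux ts (if t > big then t else big)

theorem crv_foldl (trees : List Int) : ∀ (vis : List Int) (big icu : Int),
    (trees.foldl
      (fun (st : List Int × Int × Int) tree =>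
        if tree > st.2.1 then (st.1 ++ [(1 : Int)], tree, (1 : Int))
        else (st.1 ++ [(0 : Int)], st.2.1, (0 : Int)))
      (vis, big, icu)).1 = vis ++ crvAux trees big := by
  induction trees with
  | nil => intro vis big icu; simp [crvAux]
  | cons t ts ih =>
      intro vis big icu
      simp only [List.foldl_cons, crvAux]
      by_cases h : t > big <;> simp [h, ih]

theorem crv_eq (trees : List Int) : check_row_visibility trees = crvAux trees (-1) := by
  simp [check_row_visibility, crv_foldl]

theorem crvAux_length : ∀ (ts : List Int) (big : Int), (crvAux ts big).length = ts.length := by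
  intro ts; induction ts with
  | nil => intro big; rfl
  | cons t ts ih => intro big; simp [crvAux, ih]

theorem ite_max (t big : Int) : (if t > big then t else big) = max big t := by
  rw [max_def]; split_ifs <;> omega

theorem crvAux_getD : ∀ (ts : List Int) (big : Int) (k : Nat), k < ts.length →
    (crvAux ts big).getD k 0 = if ts.getD k 0 > (ts.take k).foldl max big then 1 else 0 := by
  intro ts; induction ts with
  | nil => intro big k hk; simp at hk
  | cons t ts ih =>
      intro big k hk
      cases k with
      | zero => simp [crvAux]
      | succ k =>
          simp only [crvAux, List.getD_cons_succ, List.take_succ_cons, List.foldl_cons]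
          rw [ih _ k (by simpa using hk), ite_max]

theorem foldl_max_pull (l : List Int) : ∀ (a x : Int), l.foldl max (max a x) = max (l.foldl max a) x := by
  induction l with
  | nil => intro a x; rfl
  | cons y t ih => intro a x; simp only [List.foldl_cons]; rw [max_right_comm a x y, ih]

theorem foldl_max_reverse (l : List Int) : ∀ (a : Int), l.reverse.foldl max a = l.foldl max a := by
  induction l with
  | nil => intro a; rfl
  | cons y t ih =>
      intro a
      simp only [List.reverse_cons, List.foldl_append, List.foldl_cons, List.foldl_nil, ih]
      rw [foldl_max_pull]

theorem max?_some (l : List Int) : ∀ (a : Int),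
    PySem.List.max? (a :: l) id = some (l.foldl max a) := by
  induction l with
  | nil => intro a; rfl
  | cons x t ih =>
      intro a
      have h1 : PySem.List.max? (a :: x :: t) id = PySem.List.max? ((max a x) :: t) id := by
        simp only [PySem.List.max?, List.foldl_cons]
        congr 1
        show (if id a < id x then some x else some a) = some (max a x)
        simp only [id_eq, max_def]
        split_ifs <;> first | rfl | (congr 1; omega)
      rw [h1, ih]
      simp only [List.foldl_cons]

theorem pymax_cons_eq_foldl (l : List Int) (a : Int) : pymax (a :: l) = l.foldl max a := by
  rw [pymax, max?_some]
  rfl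

theorem getD_map_lt {α β : Type} (f : α → β) (l : List α) (i : Nat) (h : i < l.length)
    (d : β) (d' : α) : (l.map f).getD i d = f (l.getD i d') := by
  rw [List.getD_eq_getElem _ _ (by simpa using h), List.getD_eq_getElem _ _ h, List.getElem_map]

-- column j of the grid, as both ports read it
def colj (forest : List (List Int)) (n j : Nat) : List Int :=
  (List.range n).map (fun k => (forest.getD k []).getD j 0)

theorem colj_length (forest : List (List Int)) (n j : Nat) : (colj forest n j).length = n := by
  simp [colj]

theorem colj_getD (forest : List (List Int)) (n j i : Nat) (hi : i < n) :
    (colj forest n j).getD i 0 = (forest.getD i []).getD j 0 :=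
  PySem.List.getD_map_range _ _ _ _ hi

-- entry j of the reversed visibility list of a reversed row
theorem rev_crv_entry (l : List Int) (j : Nat) (hj : j < l.length) :
    ((crvAux l.reverse (-1)).reverse).getD j 0
      = if l.getD j 0 > (l.drop (j + 1)).foldl max (-1) then 1 else 0 := by
  have hlen : (crvAux l.reverse (-1)).length = l.length := by
    rw [crvAux_length, List.length_reverse]
  have hjr : j < (crvAux l.reverse (-1)).reverse.length := by
    rw [List.length_reverse, hlen]; exact hj
  rw [List.getD_eq_getElem _ _ hjr, List.getElem_reverse]
  have hidx : (crvAux l.reverse (-1)).length - 1 - j < (crvAux l.reverse (-1)).length := by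
    rw [hlen]; omega
  rw [← List.getD_eq_getElem _ (0 : Int) hidx]
  rw [crvAux_getD _ _ _ (by rw [List.length_reverse, ← hlen]; exact hidx)]
  have hk : (crvAux l.reverse (-1)).length - 1 - j = l.length - 1 - j := by omega
  rw [hk]
  have h1 : l.reverse.getD (l.length - 1 - j) 0 = l.getD j 0 := by
    rw [List.getD_eq_getElem _ _ (by rw [List.length_reverse]; omega), List.getElem_reverse,
        List.getD_eq_getElem _ _ (by omega)]
    congr 1; omega
  have h2 : l.reverse.take (l.length - 1 - j) = (l.drop (j + 1)).reverse := by
    rw [List.take_reverse]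
    have : l.length - (l.length - 1 - j) = j + 1 := by omega
    rw [this]
  rw [h1, h2, foldl_max_reverse]

theorem transpose_length (array : List (List Int)) :
    (transpose array).length = (array.getD 0 []).length := by
  simp [transpose, PySem.List.pyGetD_zero]

theorem transpose_getD (forest : List (List Int)) (j : Nat)
    (h0 : (forest.getD 0 []).length = forest.length) (hj : j < forest.length) :
    (transpose forest).getD j [] = colj forest forest.length j := by
  unfold transpose colj
  rw [PySem.List.pyGetD_zero, h0, PySem.List.getD_map_range _ _ _ _ hj]
  refine List.map_congr_left ?_
  intro k _
  simp [PySem.List.pyGetD_natCast]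

-- entry (i, j) of transpose M, inside the shape bounds
theorem ent_transpose (M : List (List Int)) (i j : Nat)
    (hi : i < (M.getD 0 []).length) (hj : j < M.length) :
    ((transpose M).getD i []).getD j 0 = (M.getD j []).getD i 0 := by
  unfold transpose
  rw [PySem.List.pyGetD_zero]
  rw [PySem.List.getD_map_range _ _ _ _ hi, PySem.List.getD_map_range _ _ _ _ hj]
  simp [PySem.List.pyGetD_natCast]

theorem pyOr4_ite (c1 c2 c3 c4 : Prop) [Decidable c1] [Decidable c2] [Decidable c3] [Decidable c4] :
    pyOr (if c1 then (1 : Int) else 0)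
      (pyOr (if c2 then (1 : Int) else 0)
        (pyOr (if c3 then (1 : Int) else 0) (if c4 then (1 : Int) else 0)))
      = if c1 ∨ c2 ∨ c3 ∨ c4 then (1 : Int) else 0 := by
  by_cases h1 : c1 <;> by_cases h2 : c2 <;> by_cases h3 : c3 <;> by_cases h4 : c4 <;>
    simp [pyOr, h1, h2, h3, h4]

-- the four per-direction entry values of A, for a grid satisfying Pre_
theorem entry_left (forest : List (List Int)) (i j : Nat) (hi : i < forest.length)
    (hj : j < (forest.getD i []).length) :
    ((check_array_visibility forest).getD i []).getD j 0
      = if (forest.getD i []).getD j 0 > ((forest.getD i []).take j).foldl max (-1) then 1 else 0 := by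
  unfold check_array_visibility
  rw [getD_map_lt _ _ _ hi _ ([] : List Int), crv_eq, crvAux_getD _ _ _ hj]

theorem entry_right (forest : List (List Int)) (i j : Nat) (hi : i < forest.length)
    (hj : j < (forest.getD i []).length) :
    ((flip_lr (check_array_visibility (flip_lr forest))).getD i []).getD j 0
      = if (forest.getD i []).getD j 0 > ((forest.getD i []).drop (j + 1)).foldl max (-1) then 1 else 0 := by
  unfold flip_lr check_array_visibility
  rw [getD_map_lt _ _ _ (by simpa using hi) _ ([] : List Int)]
  rw [getD_map_lt _ _ _ (by simpa using hi) _ ([] : List Int)]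
  rw [getD_map_lt _ _ _ hi _ ([] : List Int)]
  rw [crv_eq, rev_crv_entry _ _ hj]

theorem entry_top (forest : List (List Int)) (i j : Nat)
    (h0 : (forest.getD 0 []).length = forest.length)
    (hi : i < forest.length) (hj : j < forest.length) :
    ((transpose (check_array_visibility (transpose forest))).getD i []).getD j 0
      = if (colj forest forest.length j).getD i 0 >
            ((colj forest forest.length j).take i).foldl max (-1) then 1 else 0 := by
  have hTlen : (transpose forest).length = forest.length := by rw [transpose_length, h0]
  have hM0 : ((check_array_visibility (transpose forest)).getD 0 []).length = forest.length := by
    unfold check_array_visibility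
    rw [getD_map_lt _ _ _ (by rw [hTlen]; omega) _ ([] : List Int), crv_eq, crvAux_length,
        transpose_getD _ _ h0 (by omega), colj_length]
  rw [ent_transpose _ i j (by rw [hM0]; exact hi)
        (by unfold check_array_visibility; rw [List.length_map, hTlen]; exact hj)]
  unfold check_array_visibility
  rw [getD_map_lt _ _ _ (by rw [hTlen]; exact hj) _ ([] : List Int), crv_eq,
      transpose_getD _ _ h0 hj, crvAux_getD _ _ _ (by rw [colj_length]; exact hi)]

theorem entry_bottom (forest : List (List Int)) (i j : Nat)
    (h0 : (forest.getD 0 []).length = forest.length)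
    (hi : i < forest.length) (hj : j < forest.length) :
    ((transpose (flip_lr (check_array_visibility (flip_lr (transpose forest))))).getD i []).getD j 0
      = if (colj forest forest.length j).getD i 0 >
            ((colj forest forest.length j).drop (i + 1)).foldl max (-1) then 1 else 0 := by
  have hTlen : (transpose forest).length = forest.length := by rw [transpose_length, h0]
  have hrowj : ∀ (k : Nat), k < forest.length →
      ((flip_lr (check_array_visibility (flip_lr (transpose forest)))).getD k []).length
        = forest.length := by
    intro k hk
    unfold flip_lr check_array_visibility
    rw [getD_map_lt _ _ _ (by simp [hTlen]; exact hk) _ ([] : List Int),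
        getD_map_lt _ _ _ (by simp [hTlen]; exact hk) _ ([] : List Int),
        getD_map_lt _ _ _ (by rw [hTlen]; exact hk) _ ([] : List Int)]
    rw [crv_eq, List.length_reverse, crvAux_length, List.length_reverse,
        transpose_getD _ _ h0 hk, colj_length]
  rw [ent_transpose _ i j (by rw [hrowj 0 (by omega)]; exact hi)
        (by unfold flip_lr check_array_visibility; simp [hTlen]; exact hj)]
  unfold flip_lr check_array_visibility
  rw [getD_map_lt _ _ _ (by simp [hTlen]; exact hj) _ ([] : List Int),
      getD_map_lt _ _ _ (by simp [hTlen]; exact hj) _ ([] : List Int),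
      getD_map_lt _ _ _ (by rw [hTlen]; exact hj) _ ([] : List Int)]
  rw [crv_eq, transpose_getD _ _ h0 hj,
      rev_crv_entry _ _ (by rw [colj_length]; exact hi)]

-- ===== VERDICT (by name: the statement is the Claim_ definition above) =====
theorem get_forest_visibility_spec : Claim_equal_get_forest_visibility := by
  intro forest _hdom hpre
  obtain ⟨hne, h0, hrows⟩ := hpre
  unfold Spec_get_forest_visibility
  have hl : check_direction forest "left" = check_array_visibility forest := by
    simp [check_direction]
  have hr : check_direction forest "right"
      = flip_lr (check_array_visibility (flip_lr forest)) := by simp [check_direction]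
  have ht : check_direction forest "top"
      = transpose (check_array_visibility (transpose forest)) := by simp [check_direction]
  have hb : check_direction forest "bottom"
      = transpose (flip_lr (check_array_visibility (flip_lr (transpose forest)))) := by
    simp [check_direction]
  simp only [get_forest_visibility, get_forest_visibility_alt, hl, hr, ht, hb,
    PySem.List.pyGetD_zero, h0]
  refine List.map_congr_left ?_
  intro i hi
  rw [List.mem_range] at hi
  refine List.map_congr_left ?_
  intro j hj
  rw [List.mem_range] at hj
  have hRmem : forest.getD i [] ∈ forest := by
    rw [List.getD_eq_getElem _ _ hi]; exact List.getElem_mem hi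
  have hRlen : forest.length ≤ (forest.getD i []).length := hrows _ hRmem
  have hjR : j < (forest.getD i []).length := lt_of_lt_of_le hj hRlen
  simp only [PySem.List.pyGetD_natCast]
  rw [entry_left forest i j hi hjR, entry_right forest i j hi hjR,
      entry_top forest i j h0 hi hj, entry_bottom forest i j h0 hi hj,
      pyOr4_ite]
  -- now reduce B's body to the same four conditions
  have hcast : ((j : Int) + 1) = ((j + 1 : Nat) : Int) := by push_cast; ring
  have hcast' : ((i : Int) + 1) = ((i + 1 : Nat) : Int) := by push_cast; ring
  rw [hcast, hcast']
  simp only [PySem.List.slice_to_natCast, PySem.List.slice_from_natCast,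
    List.any_cons, List.any_nil, Bool.or_eq_true, decide_eq_true_eq,
    pymax_cons_eq_foldl, Bool.or_false]
  have hcol : (List.range forest.length).map
      (fun (k : Nat) => (forest.getD k []).getD j 0) = colj forest forest.length j := rfl
  rw [hcol, colj_getD forest forest.length j i hi]
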